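-- pv_equiv track=rewrite | github.com/mitchgres/ShipperStatusPlus | database_interaction.py | database_format_to_normal_str
-- ===== SOURCE A (Python) =====
-- def delete_duplicates(database_input):
--     """
--     Takes values directly from the database converts that to a list, then returns a list without duplicate values
--     :param database_input:
--     :return:
--     """
--     index_value = 0
--     list_database = list(database_input)
--     return_list = []
--     for element in list_database:
--         if element not in return_list:
--             return_list.append(element)
--     return return_list
--
-- def database_format_to_normal_str(value):
--     """
--     Converts the format from the ShipperStatusPlus database to a str. value that can be used
--     :param value:
--     :return:
--     """
--     clean_list = delete_duplicates(value)
--     index = 0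
--     return_list = []
--     for values in clean_list:
--         return_list.append(values[index])
--         index + 1
--     return return_list[0]
-- ===== SOURCE B (Python) =====
-- def database_format_to_normal_str(value):
--     """
--     Converts the format from the ShipperStatusPlus database to a str. value that can be used
--     """
--     return list(value)[0][0]
-- ===== Notes on version B (the rewrite author's own statement) =====
-- stated objective: simpler
-- what changed: B replaces the dedup loop and the element-collecting loop (whose result beyond index 0 is discarded) by the direct closed form list(value)[0][0].
-- crash fix: On inputs whose first element is nonempty but that contain an empty list later, A raises IndexError (values[0] on the empty dedup'd element) while B returns value[0][0]. — e.g. on database_format_to_normal_str([["a"], []]): A raises IndexError, B returns "a"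
import Mathlib
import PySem

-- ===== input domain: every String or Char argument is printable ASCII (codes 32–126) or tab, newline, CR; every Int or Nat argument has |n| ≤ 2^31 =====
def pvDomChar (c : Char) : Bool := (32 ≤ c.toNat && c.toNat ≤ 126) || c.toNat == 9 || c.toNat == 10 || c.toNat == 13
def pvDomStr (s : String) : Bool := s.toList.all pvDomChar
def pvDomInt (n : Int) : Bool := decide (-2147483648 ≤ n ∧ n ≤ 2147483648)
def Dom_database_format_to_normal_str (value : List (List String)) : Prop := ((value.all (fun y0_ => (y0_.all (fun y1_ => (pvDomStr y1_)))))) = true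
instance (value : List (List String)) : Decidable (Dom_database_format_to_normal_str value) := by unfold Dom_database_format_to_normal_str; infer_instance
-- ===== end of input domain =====

-- B replaces A's dedup loop and collecting loop by the closed form list(value)[0][0]; objective: simpler.

-- ===== PORT A =====
-- delete_duplicates: append each element not yet present
def delete_duplicates (database_input : List (List String)) : List (List String) :=
  database_input.foldl (fun return_list element =>
    if element ∈ return_list then return_list else return_list ++ [element]) []

def database_format_to_normal_str (value : List (List String)) : String :=
  let clean_list := delete_duplicates value
  let return_list := clean_list.foldl (fun return_list values =>
    return_list ++ [(PySem.List.pyGet? values 0).getD ""]) []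
  (PySem.List.pyGet? return_list 0).getD ""

-- ===== PORT B =====
def database_format_to_normal_str_alt (value : List (List String)) : String :=
  (PySem.List.pyGet? ((PySem.List.pyGet? value 0).getD []) 0).getD ""

-- ===== PRECONDITION & SPEC =====
-- Pre_: value nonempty and no element list empty — exactly where A returns (else IndexError).
def Pre_database_format_to_normal_str (value : List (List String)) : Prop :=
  value ≠ [] ∧ ∀ l ∈ value, l ≠ []
instance (value : List (List String)) : Decidable (Pre_database_format_to_normal_str value) := by
  unfold Pre_database_format_to_normal_str; infer_instance

def pvWitness_database_format_to_normal_str : List (List String) := [["a", "b"], ["c"]]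

-- On inputs whose first element is nonempty but which contain an empty list later, A raises IndexError while B returns value[0][0].
def Raises_database_format_to_normal_str (value : List (List String)) : Prop :=
  value.head?.getD [] ≠ [] ∧ [] ∈ value
instance (value : List (List String)) : Decidable (Raises_database_format_to_normal_str value) := by
  unfold Raises_database_format_to_normal_str; infer_instance
def pvRaiseWitness_database_format_to_normal_str : List (List String) := [["a"], []]
def pvRaiseWitnessOut_database_format_to_normal_str : String := "a"

def Spec_database_format_to_normal_str (value : List (List String)) (out : String) : Prop := out = database_format_to_normal_str_alt value
instance (value : List (List String)) (out : String) : Decidable (Spec_database_format_to_normal_str value out) := by unfold Spec_database_format_to_normal_str; infer_instance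

-- ===== CLAIM (what is proved, stated in full; the proofs are below) =====
def Claim_equal_database_format_to_normal_str : Prop := ∀ (value : List (List String)), Dom_database_format_to_normal_str value → Pre_database_format_to_normal_str value → Spec_database_format_to_normal_str value (database_format_to_normal_str value)

def Claim_raises_database_format_to_normal_str : Prop :=
  (∀ (value : List (List String)), Dom_database_format_to_normal_str value → Raises_database_format_to_normal_str value → ¬ Pre_database_format_to_normal_str value) ∧
  (Dom_database_format_to_normal_str (pvRaiseWitness_database_format_to_normal_str) ∧ Raises_database_format_to_normal_str (pvRaiseWitness_database_format_to_normal_str) ∧ database_format_to_normal_str_alt (pvRaiseWitness_database_format_to_normal_str) = pvRaiseWitnessOut_database_format_to_normal_str)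

-- ===== LEMMAS AND PROOFS =====

-- a fold whose step only ever appends to the accumulator keeps the head of a nonempty accumulator
theorem foldl_ext_head {α β : Type} (f : List α → β → List α)
    (hf : ∀ a b, ∃ t, f a b = a ++ t) :
    ∀ (xs : List β) (acc : List α), acc ≠ [] → (xs.foldl f acc).head? = acc.head? := by
  intro xs
  induction xs with
  | nil => intro acc _; rfl
  | cons x xs ih =>
      intro acc h
      obtain ⟨t, ht⟩ := hf acc x
      simp only [List.foldl_cons]
      rw [ih _ (by simp [ht, h]), ht, List.head?_append_of_ne_nil _ h]

theorem dd_head (v : List String) (vs : List (List String)) :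
    (delete_duplicates (v :: vs)).head? = some v := by
  unfold delete_duplicates
  simp only [List.foldl_cons, List.not_mem_nil, if_false, List.nil_append]
  rw [foldl_ext_head _ ?_ vs [v] (by simp)]
  · rfl
  · intro a b
    by_cases hb : b ∈ a
    · exact ⟨[], by simp [hb]⟩
    · exact ⟨[b], by simp [hb]⟩

theorem collect_head (c : List (List String)) (v : List String) (h : c.head? = some v) :
    (c.foldl (fun return_list values =>
      return_list ++ [(PySem.List.pyGet? values 0).getD ""]) []).head?
      = some ((PySem.List.pyGet? v 0).getD "") := by
  cases c with
  | nil => simp at h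
  | cons x xs =>
      simp only [List.head?_cons, Option.some.injEq] at h
      subst h
      simp only [List.foldl_cons, List.nil_append]
      rw [foldl_ext_head _ (fun a b => ⟨[(PySem.List.pyGet? b 0).getD ""], rfl⟩) xs _ (by simp)]
      rfl

-- ===== VERDICT (by name: the statement is the Claim_ definition above) =====
theorem database_format_to_normal_str_spec : Claim_equal_database_format_to_normal_str := by
  intro value _ hpre
  obtain ⟨hne, _⟩ := hpre
  cases value with
  | nil => exact absurd rfl hne
  | cons v vs =>
      unfold Spec_database_format_to_normal_str database_format_to_normal_str database_format_to_normal_str_alt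
      have h2 := collect_head (delete_duplicates (v :: vs)) v (dd_head v vs)
      simp only [PySem.List.pyGet?_zero, ← List.head?_eq_getElem?] at h2 ⊢
      rw [h2]
      simp

@[simp]
theorem database_format_to_normal_str_raises : Claim_raises_database_format_to_normal_str := by
  unfold Claim_raises_database_format_to_normal_str
  refine ⟨?_, by decide⟩
  intro value _ hr hpre
  exact hpre.2 [] hr.2 rfl
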